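-- pv_equiv track=rewrite | github.com/Y3drk/ASD_2021 | BiT_Algo/11zad2_jak_dojade.py | into_Space_State
-- ===== SOURCE A (Python) =====
-- def into_Space_State(G,P,capacity):
--     n = len(G)
--     SS_Graph = [[[]]*(capacity+1) for i in range(n)]
--
--     for u in range(n):
--         for fu in range(capacity + 1):
--             tmp = []
--             for v in G[u]:
--                 if P[v[0]]: #gdy miasto jest stacja
--                     if fu - v[1] >= 0:
--                         tmp.append((v[0],capacity,v[1]))  #jesli tylko mozemy dojechac to miasta ze stacja
--                 else:
--                     for fv in range(capacity + 1):
--                         if fu - v[1] == fv:  #jesli dojeżdzamy do danego wierzchołka, który nie jest stacja z idealnie taka iloscia paliwa jaka mamy wytypowana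
--                             tmp.append((v[0],fv,v[1]))
--
--             SS_Graph[u][fu] = tmp
--
--     return SS_Graph
-- ===== SOURCE B (Python) =====
-- def into_Space_State(G, P, capacity):
--     def edge(v, fu):
--         a, w = v
--         fv = fu - w
--         if fv < 0 or (not P[a] and fv > capacity):
--             return None
--         return (a, capacity if P[a] else fv, w)
--     return [[[e for e in (edge(v, fu) for v in row) if e is not None]
--              for fu in range(capacity + 1)]
--             for row in G]
-- ===== Notes on version B (the rewrite author's own statement) =====
-- stated objective: faster
-- what changed: A's inner scan over all fuel levels fv in range(capacity+1) searching for fv == fu - v[1] is replaced by an edge-classification function computing fv directly with a bounds check, and the preallocate-then-assign matrix build is replaced by nested comprehensions filtering the mapped edges.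
import Mathlib
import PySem

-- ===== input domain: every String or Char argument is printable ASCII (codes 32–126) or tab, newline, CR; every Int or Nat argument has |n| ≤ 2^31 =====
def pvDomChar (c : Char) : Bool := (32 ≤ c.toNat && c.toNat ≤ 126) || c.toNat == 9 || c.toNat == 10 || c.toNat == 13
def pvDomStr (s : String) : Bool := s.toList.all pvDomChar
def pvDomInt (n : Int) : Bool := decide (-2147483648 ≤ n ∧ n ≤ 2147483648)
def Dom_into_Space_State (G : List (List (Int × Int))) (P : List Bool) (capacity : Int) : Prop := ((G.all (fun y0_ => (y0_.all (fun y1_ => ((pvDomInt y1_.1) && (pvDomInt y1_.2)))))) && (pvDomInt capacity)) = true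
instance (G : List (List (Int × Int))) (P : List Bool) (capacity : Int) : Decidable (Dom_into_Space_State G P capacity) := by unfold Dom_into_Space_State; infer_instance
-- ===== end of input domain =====

-- B replaces A's inner scan over all fuel levels fv (searching for fv = fu - cost) by an
-- edge-classification function computing fv directly with a bounds check, and builds the
-- matrix with nested comprehensions (map/filterMap) instead of preallocate-and-assign.


-- ===== PORT A =====
-- literal transliteration of A: preallocated n×(capacity+1) skeleton, triple loop,
-- inner linear search 'for fv in range(capacity+1): if fu - v[1] == fv', assignment SS_Graph[u][fu] = tmp
def into_Space_State (G : List (List (Int × Int))) (P : List Bool) (capacity : Int) : List (List (List (Int × Int × Int))) :=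
  let n := G.length
  let SS0 : List (List (List (Int × Int × Int))) :=
    List.replicate n (List.replicate (capacity + 1).toNat [])
  (PySem.List.pyRange 0 (n : Int) 1).foldl (fun SS u =>
    (PySem.List.pyRange 0 (capacity + 1) 1).foldl (fun SS fu =>
      let tmp := (PySem.List.pyGetD G u []).foldl (fun tmp v =>
        if PySem.List.pyGetD P v.1 false then
          (if fu - v.2 ≥ 0 then tmp ++ [(v.1, capacity, v.2)] else tmp)
        else
          (PySem.List.pyRange 0 (capacity + 1) 1).foldl (fun tmp fv =>
            if fu - v.2 = fv then tmp ++ [(v.1, fv, v.2)] else tmp) tmp) []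
      PySem.List.pySetD SS u (PySem.List.pySetD (PySem.List.pyGetD SS u []) fu tmp)) SS) SS0

-- ===== PORT B =====
-- Source B's helper 'edge(v, fu)': classify one edge, returning None (none) when unusable
def pvEdge (P : List Bool) (capacity : Int) (fu : Int) (v : Int × Int) : Option (Int × Int × Int) :=
  let fv := fu - v.2
  if fv < 0 ∨ (¬ PySem.List.pyGetD P v.1 false ∧ fv > capacity) then none
  else some (v.1, if PySem.List.pyGetD P v.1 false then capacity else fv, v.2)

-- literal transliteration of Source B: nested comprehensions; the inner comprehension maps
-- edge over the row and keeps the non-None results (filterMap id)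
def into_Space_State_alt (G : List (List (Int × Int))) (P : List Bool) (capacity : Int) : List (List (List (Int × Int × Int))) :=
  G.map (fun row =>
    (PySem.List.pyRange 0 (capacity + 1) 1).map (fun fu =>
      (row.map (pvEdge P capacity fu)).filterMap id))

-- ===== PRECONDITION & SPEC =====
-- Pre_ excludes exactly the inputs where Python A raises IndexError: whenever the fuel loop
-- runs (capacity ≥ 0), every edge target v[0] must be a valid (possibly negative) index into P.
def Pre_into_Space_State (G : List (List (Int × Int))) (P : List Bool) (capacity : Int) : Prop :=
  0 ≤ capacity → ∀ row ∈ G, ∀ v ∈ row, PySem.Raise.InRange P.length v.1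
instance (G : List (List (Int × Int))) (P : List Bool) (capacity : Int) : Decidable (Pre_into_Space_State G P capacity) := by unfold Pre_into_Space_State; infer_instance
def pvWitness_into_Space_State : (List (List (Int × Int))) × List Bool × Int :=
  ([[(0, 1)], [(1, 2), (0, 0)]], [true, false], 2)

def Spec_into_Space_State (G : List (List (Int × Int))) (P : List Bool) (capacity : Int) (out : List (List (List (Int × Int × Int)))) : Prop := out = into_Space_State_alt G P capacity
instance (G : List (List (Int × Int))) (P : List Bool) (capacity : Int) (out : List (List (List (Int × Int × Int)))) : Decidable (Spec_into_Space_State G P capacity out) := by unfold Spec_into_Space_State; infer_instance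

-- ===== CLAIM (what is proved, stated in full; the proofs are below) =====
def Claim_equal_into_Space_State : Prop := ∀ (G : List (List (Int × Int))) (P : List Bool) (capacity : Int), Dom_into_Space_State G P capacity → Pre_into_Space_State G P capacity → Spec_into_Space_State G P capacity (into_Space_State G P capacity)

-- ===== LEMMAS AND PROOFS =====

-- the common cell value: B's inner comprehension for row at fuel level fu
def pvCell (P : List Bool) (capacity : Int) (row : List (Int × Int)) (fu : Int) : List (Int × Int × Int) :=
  (row.map (pvEdge P capacity fu)).filterMap id

-- A's inner linear scan over a duplicate-free list searching for x appends g x exactly once iff x is present.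
theorem foldl_search_eq {β : Type} (x : Int) (g : Int → List β) :
    ∀ (l : List Int), l.Nodup → ∀ (acc : List β),
      l.foldl (fun acc y => if x = y then acc ++ g y else acc) acc
        = if x ∈ l then acc ++ g x else acc := by
  intro l
  induction l with
  | nil => intro _ acc; simp
  | cons a l ih =>
    intro hnd acc
    simp only [List.foldl_cons, List.mem_cons]
    by_cases hxa : x = a
    · subst hxa
      rw [if_pos rfl, ih hnd.of_cons, if_neg ((List.nodup_cons.mp hnd).1), if_pos (Or.inl rfl)]
    · rw [if_neg hxa, ih hnd.of_cons]
      by_cases hm : x ∈ l <;> simp [hm, hxa]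

-- an append-or-skip fold driven by an Option classifier computes acc ++ filterMap
theorem foldl_opt_append {α β : Type} (f : α → Option β) :
    ∀ (l : List α) (acc : List β),
      l.foldl (fun tmp v => tmp ++ (f v).toList) acc
        = acc ++ (l.map f).filterMap id := by
  intro l
  induction l with
  | nil => intro acc; simp
  | cons a l ih =>
    intro acc
    simp only [List.foldl_cons, List.map_cons, List.filterMap_cons]
    cases h : f a <;> simp [h, ih]

-- A's inner neighbour fold (with the linear fv search) computes pvCell
theorem cellA_eq (P : List Bool) (capacity : Int) (row : List (Int × Int)) (fu : Int) :
    row.foldl (fun tmp v =>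
      if PySem.List.pyGetD P v.1 false then
        (if fu - v.2 ≥ 0 then tmp ++ [(v.1, capacity, v.2)] else tmp)
      else
        (PySem.List.pyRange 0 (capacity + 1) 1).foldl (fun tmp fv =>
          if fu - v.2 = fv then tmp ++ [(v.1, fv, v.2)] else tmp) tmp) []
      = pvCell P capacity row fu := by
  have hstep : ∀ (tmp : List (Int × Int × Int)) (v : Int × Int),
      (if PySem.List.pyGetD P v.1 false then
        (if fu - v.2 ≥ 0 then tmp ++ [(v.1, capacity, v.2)] else tmp)
      else
        (PySem.List.pyRange 0 (capacity + 1) 1).foldl (fun tmp fv =>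
          if fu - v.2 = fv then tmp ++ [(v.1, fv, v.2)] else tmp) tmp)
      = tmp ++ (pvEdge P capacity fu v).toList := by
    intro tmp v
    by_cases hp : PySem.List.pyGetD P v.1 false
    · simp only [pvEdge, hp, if_true, not_true, false_and, or_false]
      by_cases h : fu - v.2 < 0
      · rw [if_neg (by omega), if_pos h]; simp
      · rw [if_pos (by omega), if_neg h]; simp
    · have hp' : PySem.List.pyGetD P v.1 false = false := by simpa using hp
      rw [if_neg hp,
        foldl_search_eq (fu - v.2) (fun fv => [(v.1, fv, v.2)]) _
          (PySem.List.nodup_pyRange_one 0 (capacity + 1))]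
      simp only [PySem.List.mem_pyRange_one, pvEdge, hp', Bool.false_eq_true,
        not_false_eq_true, true_and, if_false]
      by_cases h : 0 ≤ fu - v.2 ∧ fu - v.2 < capacity + 1
      · rw [if_pos h, if_neg (by omega)]; simp
      · rw [if_neg h, if_pos (by omega)]; simp
  calc row.foldl _ ([] : List (Int × Int × Int))
      = row.foldl (fun tmp v => tmp ++ (pvEdge P capacity fu v).toList) [] := by
        apply PySem.List.foldl_congr_mem; intro tmp v _; exact hstep tmp v
    _ = pvCell P capacity row fu := by
        simpa [pvCell] using foldl_opt_append (pvEdge P capacity fu) row []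

-- consecutive updates of the same outer slot u collapse to one update of that slot
theorem set_hoist {α : Type} (f : Int → α) (d : List α) :
    ∀ (l : List Int) (SS : List (List α)) (u : Nat), u < SS.length →
      l.foldl (fun SS fu => PySem.List.pySetD SS (u : Int)
          (PySem.List.pySetD (PySem.List.pyGetD SS (u : Int) d) fu (f fu))) SS
        = PySem.List.pySetD SS (u : Int)
            (l.foldl (fun r fu => PySem.List.pySetD r fu (f fu)) (PySem.List.pyGetD SS (u : Int) d)) := by
  intro l
  induction l with
  | nil =>
    intro SS u hu
    simp only [List.foldl_nil, PySem.List.pySetD_natCast, PySem.List.pyGetD_natCast]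
    rw [List.getD_eq_getElem SS d hu]
    exact (List.set_getElem_self hu).symm
  | cons a l ih =>
    intro SS u hu
    simp only [List.foldl_cons]
    rw [ih _ u (by rw [PySem.List.length_pySetD]; exact hu)]
    rw [PySem.List.pyGetD_pySetD_natCast _ u u _ _ hu, if_pos rfl]
    simp only [PySem.List.pySetD_natCast, List.set_set]

-- an ascending update loop over the prefix [0, c) equals mapping the update over that prefix
theorem foldl_set_range_of {α : Type} (F : List α → Nat → List α) (g : Nat → α → α) (d : α)
    (hF : ∀ (s : List α) (u : Nat), u < s.length →
      F s u = PySem.List.pySetD s (u : Int) (g u (PySem.List.pyGetD s (u : Int) d))) :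
    ∀ (c : Nat) (xs : List α), c ≤ xs.length →
      (List.range c).foldl F xs
        = (List.range c).map (fun k => g k (PySem.List.pyGetD xs (k : Int) d)) ++ xs.drop c := by
  intro c
  induction c with
  | zero => intro xs _; simp
  | succ c ih =>
    intro xs hc
    rw [List.range_succ, List.foldl_append, List.map_append, ih xs (by omega)]
    set L := (List.range c).map (fun k => g k (PySem.List.pyGetD xs (k : Int) d)) with hL
    have hLlen : L.length = c := by simp [hL]
    have hdrop : xs.drop c = xs[c] :: xs.drop (c + 1) := List.drop_eq_getElem_cons (by omega)
    have hlen : c < (L ++ xs.drop c).length := by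
      rw [List.length_append, hLlen, List.length_drop]; omega
    have key : ∀ (a : α) (t : List α),
        (L ++ a :: t).set c (g c ((L ++ a :: t).getD c d)) = L ++ (g c a) :: t := by
      intro a t
      rw [← hLlen]
      simp [List.getD]
    simp only [List.foldl_cons, List.foldl_nil, List.map_cons, List.map_nil]
    rw [hF _ c hlen, hdrop]
    simp only [PySem.List.pyGetD_natCast, PySem.List.pySetD_natCast]
    rw [key]
    rw [List.getD_eq_getElem xs d (by omega)]
    simp
    rfl

-- mapping a function of the k-th element over range (length l) is mapping over l
theorem map_range_getD {α β : Type} (l : List α) (d : α) (f : α → β) :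
    (List.range l.length).map (fun k => f (PySem.List.pyGetD l ((k : Nat) : Int) d)) = l.map f := by
  apply List.ext_getElem
  · simp
  · intro i h1 h2
    simp only [List.getElem_map, List.getElem_range, PySem.List.pyGetD_natCast]
    rw [List.getD_eq_getElem l d (by simpa using h1)]

-- a Python range over [0, b) as a Lean List.range
theorem range_toNat (b : Int) :
    PySem.List.pyRange 0 b 1 = (List.range b.toNat).map (fun (k : Nat) => (k : Int)) := by
  rw [PySem.List.pyRange_one]
  simp only [Int.sub_zero, zero_add]

-- ===== VERDICT (by name: the statement is the Claim_ definition above) =====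
theorem into_Space_State_spec : Claim_equal_into_Space_State := by
  intro G P capacity _ _
  unfold Spec_into_Space_State
  have haltB : into_Space_State_alt G P capacity
      = (List.range G.length).map (fun u =>
          (PySem.List.pyRange 0 (capacity + 1) 1).map (fun fu =>
            pvCell P capacity (PySem.List.pyGetD G ((u : Nat) : Int) []) fu)) := by
    unfold into_Space_State_alt
    rw [map_range_getD G [] (fun row => (PySem.List.pyRange 0 (capacity + 1) 1).map (fun fu =>
      pvCell P capacity row fu))]
    rfl
  rw [haltB]
  unfold into_Space_State
  simp only [cellA_eq]
  rw [range_toNat ((G.length : Int)), range_toNat (capacity + 1)]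
  simp only [Int.toNat_natCast, List.foldl_map]
  rw [foldl_set_range_of
        (fun SS u =>
          (List.range (capacity + 1).toNat).foldl (fun SS fu =>
            PySem.List.pySetD SS ((u : Nat) : Int)
              (PySem.List.pySetD (PySem.List.pyGetD SS ((u : Nat) : Int) []) ((fu : Nat) : Int)
                (pvCell P capacity (PySem.List.pyGetD G ((u : Nat) : Int) []) ((fu : Nat) : Int)))) SS)
        (fun u r =>
          (List.range (capacity + 1).toNat).foldl (fun r fu =>
            PySem.List.pySetD r ((fu : Nat) : Int)
              (pvCell P capacity (PySem.List.pyGetD G ((u : Nat) : Int) []) ((fu : Nat) : Int))) r)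
        []
        (fun s u hu => by
          have h1 := set_hoist
              (fun fu => pvCell P capacity (PySem.List.pyGetD G ((u : Nat) : Int) []) fu) []
              ((List.range (capacity + 1).toNat).map (fun (k : Nat) => (k : Int))) s u hu
          simpa [List.foldl_map] using h1)
        G.length _ (by simp)]
  simp only [List.drop_replicate, Nat.sub_self, List.replicate_zero, List.append_nil]
  apply List.map_congr_left
  intro u hu
  have hu' : u < G.length := List.mem_range.mp hu
  have hrow : PySem.List.pyGetD (List.replicate G.length (List.replicate (capacity + 1).toNat ([] : List (Int × Int × Int)))) ((u : Nat) : Int) []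
      = List.replicate (capacity + 1).toNat [] := by
    rw [PySem.List.pyGetD_natCast]
    exact List.getD_replicate _ hu'
  rw [hrow]
  rw [foldl_set_range_of
        (fun r k =>
          PySem.List.pySetD r ((k : Nat) : Int)
            (pvCell P capacity (PySem.List.pyGetD G ((u : Nat) : Int) []) ((k : Nat) : Int)))
        (fun k _ => pvCell P capacity (PySem.List.pyGetD G ((u : Nat) : Int) []) ((k : Nat) : Int))
        []
        (fun s k hk => rfl)
        (capacity + 1).toNat _ (by simp)]
  simp [Function.comp]
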